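-- pv_equiv track=rewrite | github.com/anilozbas2-svg/taipo-pro-intel | main.py | _prune_days
-- ===== SOURCE A (Python) =====
-- from typing import Dict, List, Any, Tuple, Optional
--
-- def _prune_days(d: Dict[str, Any], keep_days: int) -> Dict[str, Any]:
--     if not isinstance(d, dict):
--         return {}
--     keys = sorted(d.keys())
--     if len(keys) <= keep_days:
--         return d
--     cut = keys[:-keep_days]
--     for k in cut:
--         d.pop(k, None)
--     return d
-- ===== SOURCE B (Python) =====
-- def _prune_days(d, keep_days):
--     if not isinstance(d, dict):
--         return {}
--     n = len(d)
--     if n <= keep_days: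
--         return d
--     if keep_days <= 0:
--         return {}
--     # quickselect (iterative, middle pivot) for the smallest key that is kept:
--     # the (n - keep_days)-th smallest key, 0-indexed
--     xs = list(d)
--     k = n - keep_days
--     while True:
--         p = xs[len(xs) // 2]
--         lt = [x for x in xs if x < p]
--         if k < len(lt):
--             xs = lt
--             continue
--         gt = [x for x in xs if x > p]
--         if k < len(xs) - len(gt):
--             t = p
--             break
--         k -= len(xs) - len(gt)
--         xs = gt
--     return {key: v for key, v in d.items() if key >= t}
-- ===== Notes on version B (the rewrite author's own statement) =====
-- stated objective: alternative
-- what changed: Replaces sorting all keys (then popping a slice of them one by one) with an iterative middle-pivot quickselect that finds the smallest kept key and a single filtering pass keeping the keys >= it; A mutates the dict in place, B builds a fresh dict (return value unchanged).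
-- intended difference: On non-positive keep_days with a non-empty dict A's slice keys[:-keep_days] keeps the whole dict (keep_days = 0) or drops only the -keep_days smallest keys (keep_days < 0), a slice artefact; B returns the empty dict, the intended meaning of keeping at most keep_days entries. — e.g. on _prune_days([("a", 1)], 0): A returns [("a", 1)], B returns []
import Mathlib
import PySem

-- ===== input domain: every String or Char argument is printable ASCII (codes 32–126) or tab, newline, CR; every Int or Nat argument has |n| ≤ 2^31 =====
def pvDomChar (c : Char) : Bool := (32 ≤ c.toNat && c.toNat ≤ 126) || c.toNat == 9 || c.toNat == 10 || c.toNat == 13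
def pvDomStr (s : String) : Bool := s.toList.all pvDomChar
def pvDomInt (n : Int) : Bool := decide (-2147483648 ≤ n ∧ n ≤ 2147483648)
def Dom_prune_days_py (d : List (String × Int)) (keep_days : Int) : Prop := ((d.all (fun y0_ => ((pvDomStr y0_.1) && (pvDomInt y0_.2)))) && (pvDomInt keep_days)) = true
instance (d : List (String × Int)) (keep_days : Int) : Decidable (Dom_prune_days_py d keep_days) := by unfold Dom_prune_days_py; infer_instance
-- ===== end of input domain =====

-- B replaces A's full sort of the keys by an iterative quickselect for the smallest kept key and
-- one filtering pass. A mutates its argument dict in place and returns it; B builds a fresh dict: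
-- the equivalence proved here is about the RETURN value only.

-- ===== PORT A =====
def prune_days_py (d : List (String × Int)) (keep_days : Int) : List (String × Int) :=
  let dd := PySem.Dict.ofList d
  let keys := PySem.List.sorted dd.keys (fun x => x) false
  if (keys.length : Int) ≤ keep_days then dd.items
  else
    let cut := PySem.List.slice keys none (some (-keep_days))
    (cut.foldl (fun acc k => PySem.Dict.erase acc k) dd).items

-- ===== PORT B =====
-- two facts the quickselect loop's termination cites: the pivot is a member, and
-- filtering it out shrinks the list
lemma pvFilterLenLt {α : Type} (xs : List α) (pr : α → Bool) (x : α)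
    (hx : x ∈ xs) (hpx : pr x = false) : (xs.filter pr).length < xs.length :=
  List.length_filter_lt_length_iff_exists.mpr ⟨x, hx, by simp [hpx]⟩

lemma pvGetDMidMem (xs : List String) (hx : ¬ xs.length = 0) : xs.getD (xs.length / 2) "" ∈ xs := by
  rw [List.getD_eq_getElem _ _ (Nat.div_lt_self (Nat.pos_of_ne_zero hx) one_lt_two)]
  exact List.getElem_mem _

-- the quickselect while-loop of Source B (middle pivot): k-th smallest (0-indexed) of xs;
-- "" on the empty-list path, which Source B never reaches (there the Python would raise IndexError)
def pvSelect (xs : List String) (k : Int) : String :=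
  if hx : xs.length = 0 then ""
  else
    let p := xs.getD (xs.length / 2) ""
    let lt := xs.filter (fun x => decide (x < p))
    if k < (lt.length : Int) then pvSelect lt k
    else
      let gt := xs.filter (fun x => decide (p < x))
      if k < (xs.length : Int) - (gt.length : Int) then p
      else pvSelect gt (k - ((xs.length : Int) - (gt.length : Int)))
termination_by xs.length
decreasing_by
  · simpa using pvFilterLenLt xs.attach (fun x => decide ((x : String) < xs.getD (xs.length / 2) ""))
      ⟨_, pvGetDMidMem xs hx⟩ (List.mem_attach _ _) (by simp)
  · simpa using pvFilterLenLt xs.attach (fun x => decide (xs.getD (xs.length / 2) "" < (x : String)))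
      ⟨_, pvGetDMidMem xs hx⟩ (List.mem_attach _ _) (by simp)

def prune_days_py_alt (d : List (String × Int)) (keep_days : Int) : List (String × Int) :=
  let dd := PySem.Dict.ofList d
  let n := dd.size
  if (n : Int) ≤ keep_days then dd.items
  else if keep_days ≤ 0 then []
  else
    let t := pvSelect dd.keys ((n : Int) - keep_days)
    dd.items.filter (fun p => decide (t ≤ p.1))

-- ===== PRECONDITION & SPEC =====
-- On non-positive keep_days with a non-empty dict, A's slice keys[:-keep_days] keeps the whole
-- dict (keep_days = 0) or drops only the -keep_days smallest keys (keep_days < 0) — a slice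
-- artefact; B returns the empty dict, which is what "keep at most keep_days entries" intends.
def D_prune_days_py (d : List (String × Int)) (keep_days : Int) : Prop :=
  keep_days ≤ 0 ∧ 0 < ((PySem.List.dedup (d.map Prod.fst)).length : Int) + keep_days
instance (d : List (String × Int)) (keep_days : Int) : Decidable (D_prune_days_py d keep_days) := by
  unfold D_prune_days_py; infer_instance

def Spec_prune_days_py (d : List (String × Int)) (keep_days : Int) (out : List (String × Int)) : Prop :=
  ¬ D_prune_days_py d keep_days → out = prune_days_py_alt d keep_days
instance (d : List (String × Int)) (keep_days : Int) (out : List (String × Int)) : Decidable (Spec_prune_days_py d keep_days out) := by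
  unfold Spec_prune_days_py; infer_instance

def pvDiffWitness_prune_days_py : (List (String × Int)) × Int := ([("a", 1)], 0)
def pvDiffWitnessOut_prune_days_py : (List (String × Int)) × (List (String × Int)) :=
  ([("a", 1)], [])

-- ===== CLAIM (what is proved, stated in full; the proofs are below) =====
def Claim_unchanged_prune_days_py : Prop := ∀ (d : List (String × Int)) (keep_days : Int), Dom_prune_days_py d keep_days → Spec_prune_days_py d keep_days (prune_days_py d keep_days)
def Claim_changed_prune_days_py : Prop := Dom_prune_days_py (pvDiffWitness_prune_days_py.1) (pvDiffWitness_prune_days_py.2) ∧ D_prune_days_py (pvDiffWitness_prune_days_py.1) (pvDiffWitness_prune_days_py.2) ∧ prune_days_py (pvDiffWitness_prune_days_py.1) (pvDiffWitness_prune_days_py.2) = pvDiffWitnessOut_prune_days_py.1 ∧ prune_days_py_alt (pvDiffWitness_prune_days_py.1) (pvDiffWitness_prune_days_py.2) = pvDiffWitnessOut_prune_days_py.2 ∧ pvDiffWitnessOut_prune_days_py.1 ≠ pvDiffWitnessOut_prune_days_py.2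
def Claim_exact_prune_days_py : Prop := ∀ (d : List (String × Int)) (keep_days : Int), Dom_prune_days_py d keep_days → D_prune_days_py d keep_days → prune_days_py d keep_days ≠ prune_days_py_alt d keep_days

-- ===== LEMMAS AND PROOFS =====

lemma dedup_map_fst_eq_keys (d : List (String × Int)) :
    PySem.List.dedup (d.map Prod.fst) = (PySem.Dict.ofList d).keys := by
  rw [PySem.List.dedup_eq_ofList]
  show _ = (List.foldl (fun acc p => acc.insert p.1 p.2) PySem.Dict.empty d).keys
  rw [PySem.Dict.keys_foldl_insert_key d Prod.fst (fun _ p => p.2) PySem.Dict.empty]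
  simp [PySem.Dict.keys_empty, PySem.Set.update_nil_left]

lemma sorted_nodup (xs : List String) (h : xs.Nodup) :
    (PySem.List.sorted xs (fun x => x) false).Nodup :=
  ((PySem.List.sorted_perm xs (fun x => x) false).nodup_iff).mpr h

lemma sorted_pairwise_lt (xs : List String) (h : xs.Nodup) :
    (PySem.List.sorted xs (fun x => x) false).Pairwise (· < ·) := by
  have h1 := PySem.List.sorted_pairwise xs (fun x => x)
  exact (h1.and (sorted_nodup xs h)).imp (fun {a b} hab => lt_of_le_of_ne hab.1 hab.2)

lemma sorted_split (xs : List String) (hnd : xs.Nodup) (p : String) (hp : p ∈ xs) :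
    PySem.List.sorted xs (fun x => x) false =
      PySem.List.sorted (xs.filter (fun x => decide (x < p))) (fun x => x) false
        ++ p :: PySem.List.sorted (xs.filter (fun x => decide (p < x))) (fun x => x) false := by
  have hltnd : (xs.filter (fun x => decide (x < p))).Nodup := hnd.filter _
  have hgtnd : (xs.filter (fun x => decide (p < x))).Nodup := hnd.filter _
  set L := PySem.List.sorted (xs.filter (fun x => decide (x < p))) (fun x => x) false with hL
  set G := PySem.List.sorted (xs.filter (fun x => decide (p < x))) (fun x => x) false with hG
  have hmemL : ∀ y, y ∈ L ↔ y ∈ xs ∧ y < p := by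
    intro y; rw [hL, PySem.List.mem_sorted]; simp
  have hmemG : ∀ y, y ∈ G ↔ y ∈ xs ∧ p < y := by
    intro y; rw [hG, PySem.List.mem_sorted]; simp
  have hndys : (L ++ p :: G).Nodup := by
    refine List.Nodup.append (sorted_nodup _ hltnd) ?_ ?_
    · refine List.Pairwise.cons ?_ (sorted_nodup _ hgtnd)
      intro y hy
      have := (hmemG y).mp hy
      exact fun h => absurd this.2 (by rw [h]; exact lt_irrefl _)
    · intro a haL haG
      have h1 := (hmemL a).mp haL
      rcases List.mem_cons.mp haG with h | h
      · exact absurd h1.2 (by rw [h]; exact lt_irrefl _)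
      · exact absurd (lt_trans h1.2 ((hmemG a).mp h).2) (lt_irrefl _)
  have hperm : (L ++ p :: G).Perm xs := by
    rw [List.perm_ext_iff_of_nodup hndys hnd]
    intro a
    constructor
    · intro ha
      rcases List.mem_append.mp ha with h | h
      · exact ((hmemL a).mp h).1
      · rcases List.mem_cons.mp h with h | h
        · exact h ▸ hp
        · exact ((hmemG a).mp h).1
    · intro ha
      rcases lt_trichotomy a p with h | h | h
      · exact List.mem_append.mpr (Or.inl ((hmemL a).mpr ⟨ha, h⟩))
      · exact List.mem_append.mpr (Or.inr (List.mem_cons.mpr (Or.inl h)))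
      · exact List.mem_append.mpr (Or.inr (List.mem_cons.mpr (Or.inr ((hmemG a).mpr ⟨ha, h⟩))))
  have hpw : (L ++ p :: G).Pairwise (fun a b => a < b) := by
    rw [List.pairwise_append]
    refine ⟨sorted_pairwise_lt _ hltnd, ?_, ?_⟩
    · refine List.Pairwise.cons ?_ (sorted_pairwise_lt _ hgtnd)
      intro y hy; exact ((hmemG y).mp hy).2
    · intro a haL b hb
      have ha := ((hmemL a).mp haL).2
      rcases List.mem_cons.mp hb with h | h
      · exact h ▸ ha
      · exact lt_trans ha ((hmemG b).mp h).2
  exact PySem.List.sorted_eq_of_perm_of_pairwise_lt xs (L ++ p :: G) (fun x => x) hperm hpw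

lemma pvSelect_sorted (n : Nat) : ∀ (xs : List String), xs.length ≤ n → xs.Nodup →
    ∀ k : Nat, k < xs.length →
    pvSelect xs (k : Int) = (PySem.List.sorted xs (fun x => x) false).getD k "" := by
  induction n with
  | zero => intro xs h _ k hk; omega
  | succ n ih =>
    intro xs hlen hnd k hk
    have hx : ¬ xs.length = 0 := by omega
    have hdiv : xs.length / 2 < xs.length :=
      Nat.div_lt_self (Nat.pos_of_ne_zero hx) one_lt_two
    rw [pvSelect, dif_neg hx]
    dsimp only
    set p := xs.getD (xs.length / 2) "" with hp
    have hpmem : p ∈ xs := by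
      rw [hp, List.getD_eq_getElem _ _ hdiv]; exact List.getElem_mem _
    set ltl := xs.filter (fun x => decide (x < p)) with hlt
    set gtl := xs.filter (fun x => decide (p < x)) with hgt
    have hsplit := sorted_split xs hnd p hpmem
    rw [← hlt, ← hgt] at hsplit
    set L := PySem.List.sorted ltl (fun x => x) false with hL
    set G := PySem.List.sorted gtl (fun x => x) false with hG
    have hLlen : L.length = ltl.length := PySem.List.length_sorted _ _ _
    have hGlen : G.length = gtl.length := PySem.List.length_sorted _ _ _
    have htot : xs.length = ltl.length + 1 + gtl.length := by
      have := congrArg List.length hsplit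
      rw [PySem.List.length_sorted] at this
      simp [hLlen, hGlen] at this
      omega
    have hltlt : ltl.length < xs.length := by omega
    have hgtlt : gtl.length < xs.length := by omega
    rw [hsplit]
    by_cases h1 : (k : Int) < (ltl.length : Int)
    · rw [if_pos h1]
      have hk1 : k < ltl.length := by exact_mod_cast h1
      rw [ih ltl (by omega) (hnd.filter _) k hk1]
      rw [List.getD_append _ _ _ _ (by omega)]
    · rw [if_neg h1]
      have hk1 : ltl.length ≤ k := by exact_mod_cast not_lt.mp h1
      have hxg : (xs.length : Int) - (gtl.length : Int) = ((ltl.length + 1 : Nat) : Int) := by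
        push_cast; omega
      by_cases h2 : (k : Int) < (xs.length : Int) - (gtl.length : Int)
      · rw [if_pos h2]
        have hk2 : k = ltl.length := by rw [hxg] at h2; omega
        rw [List.getD_append_right _ _ _ _ (by omega), hk2, hLlen]
        simp
      · rw [if_neg h2]
        have hk2 : ltl.length + 1 ≤ k := by rw [hxg] at h2; omega
        have hcast : (k : Int) - ((xs.length : Int) - (gtl.length : Int))
            = ((k - ltl.length - 1 : Nat) : Int) := by omega
        rw [hcast, ih gtl (by omega) (hnd.filter _) (k - ltl.length - 1) (by omega)]
        rw [List.getD_append_right _ _ _ _ (by omega), hLlen]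
        obtain ⟨j, hj⟩ : ∃ j, k - ltl.length = j + 1 := ⟨k - ltl.length - 1, by omega⟩
        rw [hj, List.getD_cons_succ, hG]
        simp

lemma foldl_erase_items (ks : List String) : ∀ (dd : PySem.Dict String Int),
    (ks.foldl (fun acc k => PySem.Dict.erase acc k) dd).items
      = dd.items.filter (fun p => decide (p.1 ∉ ks)) := by
  induction ks with
  | nil => intro dd; simp
  | cons k ks ih =>
    intro dd
    rw [List.foldl_cons, ih]
    show (dd.items.filter (fun p => !p.1 == k)).filter _ = _
    rw [List.filter_filter]
    apply List.filter_congr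
    intro p _
    by_cases h1 : p.1 = k <;> by_cases h2 : p.1 ∈ ks <;> simp [h1, h2]

lemma mem_take_iff_lt_getD (s : List String) (hs : s.Pairwise (· < ·)) (m : Nat)
    (hm : m < s.length) (x : String) (hx : x ∈ s) : x ∈ s.take m ↔ x < s.getD m "" := by
  have hget : s.getD m "" = s[m] := List.getD_eq_getElem s "" hm
  rw [hget]
  have hpw := List.pairwise_iff_getElem.mp hs
  constructor
  · intro h
    obtain ⟨j, hj, hjx⟩ := List.mem_take_iff_getElem.mp h
    have hjm : j < m := lt_of_lt_of_le hj (min_le_left _ _)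
    exact hjx ▸ hpw j m (lt_trans hjm hm) hm hjm
  · intro h
    obtain ⟨i, hi, hix⟩ := List.mem_iff_getElem.mp hx
    refine List.mem_take_iff_getElem.mpr ⟨i, ?_, hix⟩
    have him : i < m := by
      by_contra hc
      push Not at hc
      rcases Nat.eq_or_lt_of_le hc with h2 | h2
      · subst h2
        exact absurd (hix ▸ h) (lt_irrefl _)
      · exact absurd (lt_trans (hpw m i hm hi h2) (hix ▸ h)) (lt_irrefl _)
    omega

lemma keys_length_eq_size (dd : PySem.Dict String Int) : dd.keys.length = dd.size := by
  simp [PySem.Dict.keys, PySem.Dict.size]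

lemma mem_keys_exists_item (dd : PySem.Dict String Int) (x : String) (hx : x ∈ dd.keys) :
    ∃ p ∈ dd.items, p.1 = x := by
  obtain ⟨p, hp, hpx⟩ := List.mem_map.mp hx
  exact ⟨p, hp, hpx⟩

-- ===== VERDICT (by name: the statement is the Claim_ definition above) =====
theorem prune_days_py_spec : Claim_unchanged_prune_days_py := by
  intro d kd _ hnD
  unfold D_prune_days_py at hnD
  rw [dedup_map_fst_eq_keys] at hnD
  simp only [prune_days_py, prune_days_py_alt]
  have hnd : (PySem.Dict.ofList d).keys.Nodup := PySem.Dict.nodup_keys_ofList d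
  set dd := PySem.Dict.ofList d with hdd
  set s := PySem.List.sorted dd.keys (fun x => x) false with hs
  have hslen : s.length = dd.keys.length := PySem.List.length_sorted _ _ _
  have hklen : dd.keys.length = dd.size := keys_length_eq_size dd
  have hmemkeys : ∀ p ∈ dd.items, p.1 ∈ s := by
    intro p hp
    rw [hs, PySem.List.mem_sorted]
    exact List.mem_map.mpr ⟨p, hp, rfl⟩
  by_cases hbig : ((dd.size : Int) ≤ kd)
  · rw [if_pos hbig, if_pos (by rw [hslen, hklen]; exact hbig)]
  · rw [if_neg hbig, if_neg (by rw [hslen, hklen]; exact hbig)]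
    by_cases hkd : kd ≤ 0
    · -- excluded by ¬D_: here the whole dict is erased on both sides
      rw [if_pos hkd]
      have hcnt : (dd.keys.length : Int) + kd ≤ 0 := by
        by_contra hc
        exact hnD ⟨hkd, by omega⟩
      have hcut : PySem.List.slice s none (some (-kd)) = s := by
        rw [PySem.List.slice_to s (by omega)]
        exact List.take_of_length_le (by omega)
      rw [hcut, foldl_erase_items]
      rw [List.filter_eq_nil_iff]
      intro p hp
      simp [hmemkeys p hp]
    · rw [if_neg hkd]
      have hkd0 : 0 < kd := by omega
      have hn : kd < (dd.size : Int) := not_le.mp hbig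
      set m := dd.size - kd.toNat with hm
      have hmlt : m < s.length := by rw [hslen, hklen]; omega
      have hcut : PySem.List.slice s none (some (-kd)) = s.take m := by
        have : -kd = -((kd.toNat : Nat) : Int) := by omega
        rw [this, PySem.List.slice_to_neg_natCast s kd.toNat (by omega)]
        congr 1
        rw [hslen, hklen]
      have hsel : pvSelect dd.keys ((dd.size : Int) - kd) = s.getD m "" := by
        have harg : ((dd.size : Int) - kd) = ((m : Nat) : Int) := by omega
        rw [harg]
        exact pvSelect_sorted dd.keys.length dd.keys le_rfl hnd m (by omega)
      rw [hcut, foldl_erase_items, hsel]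
      apply List.filter_congr
      intro p hp
      have hps : p.1 ∈ s := hmemkeys p hp
      have := mem_take_iff_lt_getD s (sorted_pairwise_lt dd.keys hnd) m hmlt p.1 hps
      rw [decide_eq_decide, this, not_lt]

theorem prune_days_py_changed : Claim_changed_prune_days_py := by
  unfold Claim_changed_prune_days_py
  refine ⟨by decide, by decide, ?_, ?_, by decide⟩
  · show prune_days_py [("a", 1)] 0 = [("a", 1)]
    rfl
  · show prune_days_py_alt [("a", 1)] 0 = []
    rfl

theorem prune_days_py_tight : Claim_exact_prune_days_py := by
  intro d kd _ hD
  unfold D_prune_days_py at hD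
  rw [dedup_map_fst_eq_keys] at hD
  obtain ⟨hkd, hpos⟩ := hD
  have hnd : (PySem.Dict.ofList d).keys.Nodup := PySem.Dict.nodup_keys_ofList d
  set dd := PySem.Dict.ofList d with hdd
  set s := PySem.List.sorted dd.keys (fun x => x) false with hs
  have hslen : s.length = dd.keys.length := PySem.List.length_sorted _ _ _
  have hklen : dd.keys.length = dd.size := keys_length_eq_size dd
  have hB : prune_days_py_alt d kd = [] := by
    simp only [prune_days_py_alt, ← hdd]
    rw [if_neg (by omega), if_pos hkd]
  rw [hB]
  simp only [prune_days_py, ← hdd, ← hs]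
  rw [if_neg (by rw [hslen, hklen]; omega)]
  set m := (-kd).toNat with hm
  have hmlt : m < s.length := by rw [hslen, hklen]; omega
  have hcut : PySem.List.slice s none (some (-kd)) = s.take m := by
    rw [PySem.List.slice_to s (by omega)]
  rw [hcut, foldl_erase_items]
  -- the key at position m of the sorted key list survives the erasures
  set x := s.getD m "" with hx
  have hxs : x ∈ s := by
    rw [hx, List.getD_eq_getElem _ _ hmlt]; exact List.getElem_mem _
  have hxtake : x ∉ s.take m := by
    intro hc
    exact absurd ((mem_take_iff_lt_getD s (sorted_pairwise_lt dd.keys hnd) m hmlt x hxs).mp hc)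
      (lt_irrefl _)
  obtain ⟨p, hp, hpx⟩ := mem_keys_exists_item dd x (by rw [← PySem.List.mem_sorted dd.keys (fun x => x) false, ← hs]; exact hxs)
  have hpf : p ∈ dd.items.filter (fun p => decide (p.1 ∉ s.take m)) :=
    List.mem_filter.mpr ⟨hp, by simp [hpx, hxtake]⟩
  exact List.ne_nil_of_mem hpf
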